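-- pv_equiv track=rewrite | github.com/jdinalt/forgather | src/forgather/ml/pipeline_trainer.py | pipeline_stage_indices
-- ===== SOURCE A (Python) =====
-- from typing import Callable, Any, Dict, List, Tuple, Optional, Union
--
-- def pipeline_stage_indices(pp_size, n_stages, style: str = "loop") -> List[Tuple[int]]:
--     """
--     Get the stage indices for all ranks
--
--     See: https://github.com/pytorch/torchtitan/blob/main/torchtitan/distributed/pipeline.py#L194
--     """
--     stages_per_rank = n_stages // pp_size
--     match style:
--         case "loop":
--             assert (
--                 n_stages % pp_size == 0
--             ), f"n_stages {n_stages} must be divisible by pipeline size {pp_size}"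
--
--             stage_indices = list(
--                 tuple(rank + i * pp_size for i in range(stages_per_rank))
--                 for rank in range(pp_size)
--             )
--         case "v":
--             # Sanity check that all of the computed indices are valid
--             assert stages_per_rank == 2
--
--             stage_indices = list(
--                 tuple(
--                     x for x in zip(range(pp_size), range(n_stages - 1, pp_size - 1, -1))
--                 )
--             )
--
--         case _:
--             raise Exception(f"Unrecognized indices styel {style}")
--
--     return stage_indices
-- ===== SOURCE B (Python) =====
-- def pipeline_stage_indices(pp_size, n_stages, style: str = "loop"):
--     """
--     Get the stage indices for all ranks (scatter-by-modulo formulation).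
--     """
--     stages_per_rank = n_stages // pp_size
--     if style == "loop":
--         assert (
--             n_stages % pp_size == 0
--         ), f"n_stages {n_stages} must be divisible by pipeline size {pp_size}"
--         buckets = {}
--         for i in range(n_stages):
--             buckets.setdefault(i % pp_size, []).append(i)
--         return [tuple(buckets.get(r, ())) for r in range(pp_size)]
--     elif style == "v":
--         assert stages_per_rank == 2
--         return [(r, n_stages - 1 - r) for r in range(pp_size)]
--     else:
--         raise Exception(f"Unrecognized indices styel {style}")
-- ===== Notes on version B (the rewrite author's own statement) =====
-- stated objective: alternative
-- what changed: The 'loop' branch no longer computes each rank's tuple by the closed formula rank+i*pp_size; instead it scatters all stage indices 0..n_stages-1 into pp_size buckets by i % pp_size in a single pass, and the 'v' branch builds (r, n_stages-1-r) pairs directly instead of materializing and zipping two range objects.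
import Mathlib
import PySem

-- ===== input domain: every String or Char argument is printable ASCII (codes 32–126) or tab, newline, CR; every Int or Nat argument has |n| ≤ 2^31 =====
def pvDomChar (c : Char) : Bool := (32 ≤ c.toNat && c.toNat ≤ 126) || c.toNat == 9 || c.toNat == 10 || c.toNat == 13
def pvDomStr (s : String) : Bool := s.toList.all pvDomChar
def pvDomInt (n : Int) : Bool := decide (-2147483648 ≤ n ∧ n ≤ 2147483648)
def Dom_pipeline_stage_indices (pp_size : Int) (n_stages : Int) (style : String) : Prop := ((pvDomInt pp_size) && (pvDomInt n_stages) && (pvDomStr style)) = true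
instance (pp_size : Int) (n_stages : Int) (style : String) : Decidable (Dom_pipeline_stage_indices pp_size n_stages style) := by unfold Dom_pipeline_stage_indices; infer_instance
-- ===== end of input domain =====

-- B replaces the per-rank closed-formula tuples of the 'loop' branch by a single scatter pass over
-- all stage indices (a dict bucket keyed by i % pp_size collects stage i, read back per rank) and
-- builds the 'v' pairs directly instead of zipping two ranges; same return value wherever A
-- returns (alternative decomposition, no speed claim).

-- ===== PORT A =====
def pipeline_stage_indices (pp_size : Int) (n_stages : Int) (style : String) : List (List Int) :=
  let stages_per_rank := PySem.Int.floordiv n_stages pp_size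
  if style = "loop" then
    (PySem.List.pyRange 0 pp_size).map (fun rank =>
      (PySem.List.pyRange 0 stages_per_rank).map (fun i => rank + i * pp_size))
  else if style = "v" then
    ((PySem.List.pyRange 0 pp_size).zip (PySem.List.pyRange (n_stages - 1) (pp_size - 1) (-1))).map
      (fun x => [x.1, x.2])
  else []  -- 'case _' raises Exception in Python: excluded by Pre_

-- ===== PORT B =====
def pipeline_stage_indices_alt (pp_size : Int) (n_stages : Int) (style : String) : List (List Int) :=
  let stages_per_rank := PySem.Int.floordiv n_stages pp_size
  if style = "loop" then
    -- buckets.setdefault(i % pp_size, []).append(i)  ==  buckets[k] = buckets.get(k, []) + [i]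
    let buckets : PySem.Dict Int (List Int) :=
      (PySem.List.pyRange 0 n_stages).foldl
        (fun d i => d.modify (PySem.Int.mod i pp_size) [] (fun b => b ++ [i]))
        PySem.Dict.empty
    (PySem.List.pyRange 0 pp_size).map (fun r => buckets.getD r [])
  else if style = "v" then
    (PySem.List.pyRange 0 pp_size).map (fun r => [r, n_stages - 1 - r])
  else []  -- raise Exception in Python: excluded by Pre_

-- ===== PRECONDITION & SPEC =====
-- Exactly the inputs on which the Python A returns normally: pp_size = 0 raises
-- ZeroDivisionError, the failed asserts raise AssertionError, any other style raises Exception.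
def Pre_pipeline_stage_indices (pp_size : Int) (n_stages : Int) (style : String) : Prop :=
  pp_size ≠ 0 ∧
    ((style = "loop" ∧ pp_size ∣ n_stages) ∨
     (style = "v" ∧ PySem.Int.floordiv n_stages pp_size = 2))
instance (pp_size : Int) (n_stages : Int) (style : String) : Decidable (Pre_pipeline_stage_indices pp_size n_stages style) := by unfold Pre_pipeline_stage_indices; infer_instance

def pvWitness_pipeline_stage_indices : Int × Int × String := (2, 4, "loop")

def Spec_pipeline_stage_indices (pp_size : Int) (n_stages : Int) (style : String) (out : List (List Int)) : Prop := out = pipeline_stage_indices_alt pp_size n_stages style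
instance (pp_size : Int) (n_stages : Int) (style : String) (out : List (List Int)) : Decidable (Spec_pipeline_stage_indices pp_size n_stages style out) := by unfold Spec_pipeline_stage_indices; infer_instance

-- ===== CLAIM (what is proved, stated in full; the proofs are below) =====
def Claim_equal_pipeline_stage_indices : Prop := ∀ (pp_size : Int) (n_stages : Int) (style : String), Dom_pipeline_stage_indices pp_size n_stages style → Pre_pipeline_stage_indices pp_size n_stages style → Spec_pipeline_stage_indices pp_size n_stages style (pipeline_stage_indices pp_size n_stages style)

-- ===== LEMMAS AND PROOFS =====

-- the bucket a rank reads back from the scatter fold is the chronological fold of its own stages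
lemma pvScatter_getD (p : Int) (l : List Int) (d : PySem.Dict Int (List Int)) (r : Int) :
    ((l.foldl (fun d i => d.modify (PySem.Int.mod i p) [] (fun b => b ++ [i])) d).getD r []) =
      l.foldl (fun acc i => if PySem.Int.mod i p = r then acc ++ [i] else acc) (d.getD r []) := by
  induction l generalizing d with
  | nil => rfl
  | cons i l ih =>
    simp only [List.foldl_cons]
    rw [ih]
    have hstep : (d.modify (PySem.Int.mod i p) [] (fun b => b ++ [i])).getD r [] =
        if PySem.Int.mod i p = r then d.getD r [] ++ [i] else d.getD r [] := by
      rw [PySem.Dict.modify, PySem.Dict.getD_insert]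
      by_cases h : PySem.Int.mod i p = r
      · rw [if_pos h.symm, if_pos h, h]
      · rw [if_neg (fun hh => h hh.symm), if_neg h]
    rw [hstep]

-- the ascending stage indices below Q*p that are ≡ r (mod p) are r, r+p, …, r+(Q-1)p
lemma pvFilterBlocks (p : Int) (hp : 0 < p) (r : Int) (hr0 : 0 ≤ r) (hr : r < p) (Q : Nat) :
    (PySem.List.pyRange 0 ((Q : Int) * p)).filter
        (fun i => decide (PySem.Int.mod i p = r)) =
      (PySem.List.pyRange 0 (Q : Int)).map (fun j => r + j * p) := by
  induction Q with
  | zero => simp [PySem.List.pyRange_one_eq_nil (le_refl 0)]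
  | succ Q ih =>
    have h1 : (0 : Int) ≤ (Q : Int) * p := by positivity
    have h2 : ((Q : Int)) * p ≤ ((Q : Int) + 1) * p := by nlinarith
    push_cast
    rw [PySem.List.pyRange_one_append 0 ((Q : Int) * p) (((Q : Int) + 1) * p) h1 h2,
        List.filter_append, ih,
        PySem.List.pyRange_one_succ_right (by positivity : (0 : Int) ≤ (Q : Int)),
        List.map_append]
    congr 1
    -- the last block contributes exactly its element ≡ r (mod p)
    have hPQ : (((Q : Int) + 1) * p - (Q : Int) * p).toNat = p.toNat := by
      congr 1; ring
    rw [PySem.List.pyRange_one ((Q : Int) * p) (((Q : Int) + 1) * p), hPQ, List.filter_map]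
    have hcong : ∀ k ∈ List.range p.toNat,
        ((fun i => decide (PySem.Int.mod i p = r)) ∘ fun k : Nat => (Q : Int) * p + (k : Int)) k
          = (decide (k = r.toNat)) := by
      intro k hk
      have hk' : (k : Int) < p := by
        have := List.mem_range.mp hk; omega
      have hmod : PySem.Int.mod ((Q : Int) * p + (k : Int)) p = (k : Int) := by
        rw [PySem.Int.mod_eq_emod_of_pos hp]
        have : ((Q : Int) * p + (k : Int)) = (k : Int) + p * (Q : Int) := by ring
        rw [this, Int.add_mul_emod_self_left]
        exact Int.emod_eq_of_lt (by positivity) hk'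
      simp only [Function.comp]
      rw [hmod]
      simp only [decide_eq_decide]
      omega
    rw [List.filter_congr hcong]
    have hrP : r.toNat < p.toNat := by omega
    have : List.filter (fun k => decide (k = r.toNat)) (List.range p.toNat) = [r.toNat] := by
      rw [List.filter_eq, List.count_range, if_pos hrP, List.replicate_one]
    rw [this]
    simp only [List.map_cons, List.map_nil, List.cons.injEq, and_true]
    omega

lemma pv_loop_eq (p n : Int) (hp : p ≠ 0) (hd : p ∣ n) :
    (PySem.List.pyRange 0 p).map (fun rank =>
        (PySem.List.pyRange 0 (PySem.Int.floordiv n p)).map (fun i => rank + i * p)) =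
      (PySem.List.pyRange 0 p).map (fun r =>
        ((PySem.List.pyRange 0 n).foldl
            (fun d i => d.modify (PySem.Int.mod i p) [] (fun b => b ++ [i]))
            PySem.Dict.empty).getD r []) := by
  rcases lt_or_gt_of_ne hp with hneg | hp0
  · -- pp_size < 0: both sides map over the empty range
    rw [PySem.List.pyRange_one_eq_nil (le_of_lt hneg)]
    rfl
  · apply List.map_congr_left
    intro r hr
    obtain ⟨hr0, hrp⟩ := (PySem.List.mem_pyRange_one).mp hr
    rw [pvScatter_getD]
    have hempty : (PySem.Dict.empty : PySem.Dict Int (List Int)).getD r [] = [] := rfl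
    rw [hempty]
    have hshape : (fun (acc : List Int) (i : Int) =>
          if PySem.Int.mod i p = r then acc ++ [i] else acc) =
        (fun acc i =>
          if (fun i => decide (PySem.Int.mod i p = r)) i = true
          then acc ++ [id i] else acc) := by
      funext acc i; simp
    rw [hshape, PySem.List.foldl_append_if, List.map_id, List.nil_append]
    have hq : PySem.Int.floordiv n p = n / p := PySem.Int.floordiv_eq_ediv_of_pos hp0
    by_cases hn : n ≤ 0
    · -- a non-positive stage count: no stages at all on either side
      have hq0 : n / p ≤ 0 := by
        rcases hd with ⟨c, rfl⟩
        rw [Int.mul_ediv_cancel_left _ hp]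
        nlinarith
      rw [hq, PySem.List.pyRange_one_eq_nil hn, PySem.List.pyRange_one_eq_nil hq0]
      rfl
    · replace hn : 0 < n := by omega
      have hmul : n / p * p = n := Int.ediv_mul_cancel hd
      have hq0 : 0 < n / p := by
        rcases hd with ⟨c, rfl⟩
        have : 0 < c := by nlinarith
        rw [Int.mul_ediv_cancel_left _ hp]; omega
      have hQ : (((n / p).toNat : Int)) = n / p := Int.toNat_of_nonneg (le_of_lt hq0)
      rw [hq, ← hQ]
      obtain ⟨Q, hQg⟩ : ∃ Q : Nat, (n / p).toNat = Q := ⟨_, rfl⟩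
      rw [hQg]
      rw [show n = ((Q : Int)) * p from by rw [← hQg, hQ]; exact hmul.symm]
      rw [pvFilterBlocks p hp0 r hr0 hrp Q]

lemma pv_v_eq (p n : Int) (hp : p ≠ 0) (hq : PySem.Int.floordiv n p = 2) :
    ((PySem.List.pyRange 0 p).zip (PySem.List.pyRange (n - 1) (p - 1) (-1))).map
        (fun x => [x.1, x.2]) =
      (PySem.List.pyRange 0 p).map (fun r => [r, n - 1 - r]) := by
  rcases lt_or_gt_of_ne hp with hneg | hp0
  · rw [PySem.List.pyRange_one_eq_nil (le_of_lt hneg)]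
    rfl
  · have hb := (PySem.Int.floordiv_eq_iff_of_pos hp0).mp hq
    have hlen2 : (PySem.List.pyRange (n - 1) (p - 1) (-1)).length = (n - p).toNat := by
      rw [PySem.List.pyRange_neg_one, List.length_map, List.length_range]
      congr 1; omega
    have hmin : min (PySem.List.pyRange 0 p).length
        (PySem.List.pyRange (n - 1) (p - 1) (-1)).length = p.toNat := by
      rw [hlen2, PySem.List.length_pyRange_one]
      omega
    apply List.ext_getElem
    · rw [List.length_map, List.length_map, List.length_zip, hmin,
          PySem.List.length_pyRange_one]
      omega
    · intro k h1 h2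
      have hkP : k < p.toNat := by
        rw [List.length_map, List.length_zip, hmin] at h1; exact h1
      simp only [List.getElem_map, List.getElem_zip, PySem.List.pyRange_neg_one,
        PySem.List.getElem_pyRange_one, List.getElem_range]
      simp only [List.cons.injEq, and_true]
      exact ⟨trivial, by omega⟩

-- ===== VERDICT (by name: the statement is the Claim_ definition above) =====
theorem pipeline_stage_indices_spec : Claim_equal_pipeline_stage_indices := by
  intro p n style _hdom hpre
  obtain ⟨hp, hcase⟩ := hpre
  unfold Spec_pipeline_stage_indices pipeline_stage_indices pipeline_stage_indices_alt
  rcases hcase with ⟨hstyle, hd⟩ | ⟨hstyle, hq⟩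
  · subst hstyle
    rw [if_pos rfl, if_pos rfl]
    exact pv_loop_eq p n hp hd
  · subst hstyle
    have hne : ¬ ("v" = "loop") := by decide
    rw [if_neg hne, if_neg hne, if_pos rfl, if_pos rfl]
    exact pv_v_eq p n hp hq
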